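-- pv_equiv track=rewrite | github.com/YvetteXie/Club-Recommendation-System | club_functions.py | get_last_to_first
-- ===== SOURCE A (Python) =====
-- from typing import List, Tuple, Dict, TextIO
--
-- def update_dict(key: str, value: str,
--                 key_to_values: Dict[str, List[str]]) -> None:
--     """Update key_to_values with key/value. If key is in key_to_values,
--     and value is not already in the list associated with key,
--     append value to the list. Otherwise, add the pair key/[value] to
--     key_to_values.
--
--     >>> d = {'1': ['a', 'b']}
--     >>> update_dict('2', 'c', d)
--     >>> d == {'1': ['a', 'b'], '2': ['c']}
--     True
--     >>> update_dict('1', 'c', d)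
--     >>> d == {'1': ['a', 'b', 'c'], '2': ['c']}
--     True
--     >>> update_dict('1', 'c', d)
--     >>> d == {'1': ['a', 'b', 'c'], '2': ['c']}
--     True
--     """
--
--     if key not in key_to_values:
--         key_to_values[key] = []
--
--     if value not in key_to_values[key]:
--         key_to_values[key].append(value)
--
-- def get_last_to_first(
--         person_to_friends: Dict[str, List[str]]) -> Dict[str, List[str]]:
--     """Return a "last name to first name(s)" dictionary with the people from the
--     "person to friends" dictionary person_to_friends.
--
--     >>> get_last_to_first(P2F) == {
--     ...    'Katsopolis': ['Jesse'],
--     ...    'Tanner': ['Danny R', 'Michelle', 'Stephanie J'],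
--     ...    'Gladstone': ['Joey'],
--     ...    'Donaldson-Katsopolis': ['Rebecca'],
--     ...    'Gibbler': ['Kimmy'],
--     ...    'Tanner-Fuller': ['DJ']}
--     True
--     """
--
--     last_to_first = {}
--     for person in person_to_friends:
--         update_dict(person[person.rfind(' ') + 1: ],\
--                     person[ :person.rfind(' ')], last_to_first)
--         for i in person_to_friends[person]:
--             update_dict(i[i.rfind(' ') + 1: ], i[ :i.rfind(' ')], last_to_first)
--     for last_name in last_to_first:
--         last_to_first[last_name].sort()
--     return last_to_first
-- ===== SOURCE B (Python) =====
-- def get_last_to_first(person_to_friends):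
--     """Group every name (keys and friends) by last name, computing each
--     distinct last name's value wholesale as the sorted set of its first
--     names, instead of accumulating lists incrementally."""
--     names = [n for person, friends in person_to_friends.items()
--              for n in (person, *friends)]
--     pairs = [(n[n.rfind(' ') + 1:], n[:n.rfind(' ')]) for n in names]
--     result = {}
--     for last, _ in pairs:
--         if last not in result:
--             result[last] = sorted({first for l, first in pairs if l == last})
--     return result
-- ===== Notes on version B (the rewrite author's own statement) =====
-- stated objective: simpler
-- what changed: A accumulates a dict incrementally via update_dict (membership-scan append per name) and then sorts every list in place; B flattens all names once into (last, first) pairs and, for each distinct last name, computes its value wholesale as sorted({first names with that last name}) by a single filter.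
import Mathlib
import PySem

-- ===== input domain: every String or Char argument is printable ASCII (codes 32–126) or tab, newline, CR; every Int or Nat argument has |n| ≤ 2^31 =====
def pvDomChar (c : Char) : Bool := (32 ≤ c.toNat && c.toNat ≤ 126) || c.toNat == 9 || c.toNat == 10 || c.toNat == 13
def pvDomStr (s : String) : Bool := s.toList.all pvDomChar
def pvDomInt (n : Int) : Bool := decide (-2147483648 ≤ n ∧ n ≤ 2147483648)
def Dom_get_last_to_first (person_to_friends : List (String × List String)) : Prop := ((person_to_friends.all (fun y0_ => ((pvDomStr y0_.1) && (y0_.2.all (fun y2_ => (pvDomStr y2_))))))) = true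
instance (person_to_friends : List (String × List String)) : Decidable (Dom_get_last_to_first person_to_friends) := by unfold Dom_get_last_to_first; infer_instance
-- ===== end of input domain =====

-- B groups all names by last name and computes each distinct last name's value wholesale as
-- sorted({first names}), instead of A's incremental update_dict accumulation + in-place sorts
-- (objective: simpler). Return-value equivalence only: the Python A mutates nothing observable.

-- name[name.rfind(' ') + 1:] and name[:name.rfind(' ')] — the slicing both sources share verbatim
def pvLast (n : String) : String := PySem.Str.slice n (some (PySem.Str.rfind n " " + 1)) none
def pvFirst (n : String) : String := PySem.Str.slice n none (some (PySem.Str.rfind n " "))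

-- ===== PORT A =====
def update_dict (key : String) (value : String)
    (key_to_values : PySem.Dict String (List String)) : PySem.Dict String (List String) :=
  let d := if key_to_values.contains key = false then key_to_values.insert key [] else key_to_values
  if value ∈ d.getD key [] then d else d.insert key (d.getD key [] ++ [value])

def get_last_to_first (person_to_friends : List (String × List String)) : List (String × List String) :=
  -- 'for person in person_to_friends' iterates the keys; 'person_to_friends[person]' is the
  -- first-match association-list lookup of the type convention
  let last_to_first := person_to_friends.foldl
    (fun d q =>
      let d := update_dict (pvLast q.1) (pvFirst q.1) d
      ((person_to_friends.lookup q.1).getD []).foldl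
        (fun d i => update_dict (pvLast i) (pvFirst i) d) d)
    PySem.Dict.empty
  let last_to_first := last_to_first.keys.foldl
    (fun d k => d.modify k [] (fun v => PySem.List.sorted v (fun x => x) false)) last_to_first
  last_to_first.items

-- ===== PORT B =====
def get_last_to_first_alt (person_to_friends : List (String × List String)) : List (String × List String) :=
  let names := person_to_friends.foldl (fun acc q => acc ++ q.1 :: q.2) []
  let pairs := names.map (fun n => (pvLast n, pvFirst n))
  let result := pairs.foldl
    (fun d q => if d.contains q.1 then d
      else d.insert q.1 (PySem.List.sorted
        ((PySem.Set.ofList ((pairs.filter (fun r => r.1 == q.1)).map (fun r => r.2))) : List String)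
        (fun x => x) false))
    PySem.Dict.empty
  result.items

-- ===== PRECONDITION & SPEC =====
-- Pre_ excludes association lists with duplicate person keys: those do not represent a Python
-- dict faithfully (dict construction collapses duplicates before A ever runs), so the corner is
-- an artefact of the encoding, not of A.
def Pre_get_last_to_first (person_to_friends : List (String × List String)) : Prop :=
  (person_to_friends.map Prod.fst).Nodup
instance (person_to_friends : List (String × List String)) : Decidable (Pre_get_last_to_first person_to_friends) := by unfold Pre_get_last_to_first; infer_instance

def pvWitness_get_last_to_first : (List (String × List String)) :=
  [("Jesse Katsopolis", ["Danny R Tanner", "DJ Tanner-Fuller"]), ("Joey", [])]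

def Spec_get_last_to_first (person_to_friends : List (String × List String)) (out : List (String × List String)) : Prop := out = get_last_to_first_alt person_to_friends
instance (person_to_friends : List (String × List String)) (out : List (String × List String)) : Decidable (Spec_get_last_to_first person_to_friends out) := by unfold Spec_get_last_to_first; infer_instance

-- ===== CLAIM (what is proved, stated in full; the proofs are below) =====
def Claim_equal_get_last_to_first : Prop := ∀ (person_to_friends : List (String × List String)), Dom_get_last_to_first person_to_friends → Pre_get_last_to_first person_to_friends → Spec_get_last_to_first person_to_friends (get_last_to_first person_to_friends)

-- ===== LEMMAS AND PROOFS =====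

-- the flattened name list, its (last, first) pairs, and the first names filed under one last name
def pvNames (pf : List (String × List String)) : List String := pf.flatMap (fun q => q.1 :: q.2)
def pvPairs (pf : List (String × List String)) : List (String × String) :=
  (pvNames pf).map (fun n => (pvLast n, pvFirst n))
def pvFirsts (ps : List (String × String)) (k : String) : List String :=
  (ps.filter (fun r => r.1 == k)).map (fun r => r.2)

-- update_dict as a single overwriting insert (on a dict with unique keys)
def pvUpd1 (k v : String) (d : PySem.Dict String (List String)) : PySem.Dict String (List String) :=
  d.insert k (if v ∈ d.getD k [] then d.getD k [] else d.getD k [] ++ [v])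

lemma pv_lookup_nodup {pf : List (String × List String)} (h : (pf.map Prod.fst).Nodup)
    {q : String × List String} (hq : q ∈ pf) : pf.lookup q.1 = some q.2 := by
  induction pf with
  | nil => cases hq
  | cons a tl ih =>
    simp only [List.map_cons, List.nodup_cons] at h
    rcases List.mem_cons.mp hq with rfl | hq'
    · simp [List.lookup]
    · have hne : (q.1 == a.1) = false := by
        apply beq_false_of_ne
        intro he
        exact h.1 (he ▸ List.mem_map_of_mem hq')
      simp [List.lookup, hne, ih h.2 hq']

lemma pv_update_dict_eq (k v : String) (d : PySem.Dict String (List String))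
    (h : d.keys.Nodup) : update_dict k v d = pvUpd1 k v d := by
  by_cases hc : d.contains k = true
  · simp only [update_dict, pvUpd1, hc, Bool.true_eq_false, if_false]
    by_cases hm : v ∈ d.getD k []
    · simp only [hm, if_true]
      apply PySem.Dict.ext
      rw [PySem.Dict.items_insert_of_contains d _ hc]
      have hcg : ∀ p ∈ d.items,
          (if (p.1 == k) = true then (k, d.getD k []) else p) = id p := by
        intro p hp
        obtain ⟨p1, p2⟩ := p
        by_cases hpk : (p1 == k) = true
        · have hk1 : p1 = k := eq_of_beq hpk
          subst hk1
          have hv : d.getD p1 [] = p2 := PySem.Dict.getD_of_mem_items d hp h []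
          simp [hv]
        · simp [hpk]
      rw [List.map_congr_left hcg, List.map_id]
    · simp only [hm, if_false]
  · have hcf : d.contains k = false := by simpa using hc
    simp only [update_dict, pvUpd1, hcf, if_true]
    rw [PySem.Dict.getD_insert_self, PySem.Dict.getD_of_not_contains d _ hcf]
    simp [PySem.Dict.insert_insert_self]

lemma pv_foldl_upd_eq (ps : List (String × String)) (d : PySem.Dict String (List String))
    (h : d.keys.Nodup) :
    ps.foldl (fun d p => update_dict p.1 p.2 d) d = ps.foldl (fun d p => pvUpd1 p.1 p.2 d) d := by
  revert h
  induction ps generalizing d with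
  | nil => intro h; rfl
  | cons p tl ih =>
    intro h
    simp only [List.foldl_cons]
    rw [pv_update_dict_eq p.1 p.2 d h]
    exact ih _ (by unfold pvUpd1; exact PySem.Dict.nodup_keys_insert _ _ _ h)

lemma pv_nodup_foldl_upd1 (ps : List (String × String)) (d : PySem.Dict String (List String))
    (h : d.keys.Nodup) : (ps.foldl (fun d p => pvUpd1 p.1 p.2 d) d).keys.Nodup := by
  revert h
  induction ps generalizing d with
  | nil => intro h; exact h
  | cons p tl ih =>
    intro h
    simp only [List.foldl_cons]
    exact ih _ (by unfold pvUpd1; exact PySem.Dict.nodup_keys_insert _ _ _ h)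

lemma pv_keys_foldl_upd1 (ps : List (String × String)) (d : PySem.Dict String (List String)) :
    (ps.foldl (fun d p => pvUpd1 p.1 p.2 d) d).keys = PySem.Set.update d.keys (ps.map (fun p => p.1)) := by
  unfold pvUpd1
  exact PySem.Dict.keys_foldl_insert_key ps (fun p => p.1)
    (fun d p => if p.2 ∈ d.getD p.1 [] then d.getD p.1 [] else d.getD p.1 [] ++ [p.2]) d

lemma pv_dedup_foldl (xs : List String) (l : List String) :
    xs.foldl (fun l f => if f ∈ l then l else l ++ [f]) l = PySem.Set.update l xs := by
  induction xs generalizing l with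
  | nil => rfl
  | cons x tl ih =>
    simp only [List.foldl_cons]
    rw [ih]
    have ha : PySem.Set.add l x = if x ∈ l then l else l ++ [x] := by
      simp [PySem.Set.add, PySem.Set.contains]
    have h2 : PySem.Set.update l (x :: tl) = PySem.Set.update (PySem.Set.add l x) tl := rfl
    rw [h2, ha]

lemma pv_getD_foldl_upd1 (ps : List (String × String)) (d : PySem.Dict String (List String))
    (k : String) :
    (ps.foldl (fun d p => pvUpd1 p.1 p.2 d) d).getD k []
      = (pvFirsts ps k).foldl (fun l f => if f ∈ l then l else l ++ [f]) (d.getD k []) := by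
  induction ps generalizing d with
  | nil => simp [pvFirsts]
  | cons p tl ih =>
    simp only [List.foldl_cons]
    rw [ih]
    by_cases hk : p.1 = k
    · have hf : pvFirsts (p :: tl) k = p.2 :: pvFirsts tl k := by
        simp [pvFirsts, hk]
      rw [hf, List.foldl_cons]
      congr 1
      unfold pvUpd1
      rw [hk, PySem.Dict.getD_insert_self]
    · have hf : pvFirsts (p :: tl) k = pvFirsts tl k := by
        simp [pvFirsts, hk]
      rw [hf]
      congr 1
      unfold pvUpd1
      exact PySem.Dict.getD_insert_of_ne d _ _ (fun he => hk he.symm)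

-- the sorting pass: modify every key of a unique-keys dict in place
lemma pv_items_foldl_modify (ks : List String) (d : PySem.Dict String (List String))
    (hd : d.keys.Nodup) (hks : ks.Nodup) (hsub : ∀ k ∈ ks, k ∈ d.keys) :
    (ks.foldl (fun d k => d.modify k [] (fun v => PySem.List.sorted v (fun x => x) false)) d).items
      = d.items.map (fun p => if p.1 ∈ ks then (p.1, PySem.List.sorted p.2 (fun x => x) false) else p) := by
  revert hd hks hsub
  induction ks generalizing d with
  | nil =>
    intro _ _ _
    simp
  | cons k tl ih =>
    intro hd hks hsub
    obtain ⟨hknotl, htl⟩ := List.nodup_cons.mp hks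
    have hkmem : k ∈ d.keys := hsub k List.mem_cons_self
    have hc : d.contains k = true := (PySem.Dict.contains_iff_mem_keys d k).mpr hkmem
    have hmod : d.modify k [] (fun v => PySem.List.sorted v (fun x => x) false)
        = d.insert k (PySem.List.sorted (d.getD k []) (fun x => x) false) := rfl
    simp only [List.foldl_cons, hmod]
    rw [ih _ (PySem.Dict.nodup_keys_insert _ _ _ hd) htl ?_]
    · rw [PySem.Dict.items_insert_of_contains d _ hc, List.map_map]
      apply List.map_congr_left
      intro p hp
      obtain ⟨p1, p2⟩ := p
      by_cases hpk : p1 = k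
      · subst hpk
        have hv : d.getD p1 [] = p2 := PySem.Dict.getD_of_mem_items d hp hd []
        simp [Function.comp, hknotl, hv]
      · have hbeq : (p1 == k) = false := beq_false_of_ne hpk
        simp [Function.comp, hbeq, hpk, List.mem_cons]
    · intro x hx
      rw [PySem.Dict.keys_insert_of_contains d _ hc]
      exact hsub x (List.mem_cons_of_mem _ hx)

-- the keys B adds, given the keys already present
def pvPick (seen : List String) : List String → List String
  | [] => []
  | k :: tl => if k ∈ seen then pvPick seen tl else k :: pvPick (seen ++ [k]) tl

lemma pv_pick_update (ks seen : List String) :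
    seen ++ pvPick seen ks = PySem.Set.update seen ks := by
  induction ks generalizing seen with
  | nil => simp [pvPick]
  | cons k tl ih =>
    by_cases hk : k ∈ seen
    · have ha : PySem.Set.add seen k = seen := by
        simp [PySem.Set.add, PySem.Set.contains, hk]
      have h2 : PySem.Set.update seen (k :: tl) = PySem.Set.update seen tl := by
        show PySem.Set.update (PySem.Set.add seen k) tl = _
        rw [ha]
      rw [h2, ← ih]
      simp [pvPick, hk]
    · have ha : PySem.Set.add seen k = seen ++ [k] := by
        simp [PySem.Set.add, PySem.Set.contains, hk]
      have h2 : PySem.Set.update seen (k :: tl) = PySem.Set.update (seen ++ [k]) tl := by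
        show PySem.Set.update (PySem.Set.add seen k) tl = _
        rw [ha]
      rw [h2, ← ih]
      simp [pvPick, hk]

lemma pv_items_foldl_guard (ps : List (String × String)) (g : String → List String)
    (d : PySem.Dict String (List String)) :
    (ps.foldl (fun d q => if d.contains q.1 then d else d.insert q.1 (g q.1)) d).items
      = d.items ++ (pvPick d.keys (ps.map (fun q => q.1))).map (fun k => (k, g k)) := by
  induction ps generalizing d with
  | nil => simp [pvPick]
  | cons p tl ih =>
    simp only [List.foldl_cons, List.map_cons]
    by_cases hc : p.1 ∈ d.keys
    · have hct : d.contains p.1 = true := (PySem.Dict.contains_iff_mem_keys d p.1).mpr hc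
      rw [if_pos hct, ih]
      simp [pvPick, hc]
    · have hcf : d.contains p.1 = false := by
        by_contra hx
        exact hc ((PySem.Dict.contains_iff_mem_keys d p.1).mp (by simpa using hx))
      rw [if_neg (by simp [hcf]), ih,
        PySem.Dict.items_insert_of_not_contains d _ hcf,
        PySem.Dict.keys_insert_of_not_contains d _ hcf]
      simp [pvPick, hc, List.append_assoc]

lemma pv_portA (pf : List (String × List String)) (h : (pf.map Prod.fst).Nodup) :
    get_last_to_first pf
      = (PySem.Set.ofList ((pvPairs pf).map (fun p => p.1)) : List String).map
          (fun k => (k, PySem.List.sorted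
            ((PySem.Set.ofList (pvFirsts (pvPairs pf) k)) : List String) (fun x => x) false)) := by
  simp only [get_last_to_first]
  have h1 : pf.foldl
      (fun d q => ((pf.lookup q.1).getD []).foldl
        (fun d i => update_dict (pvLast i) (pvFirst i) d)
        (update_dict (pvLast q.1) (pvFirst q.1) d)) PySem.Dict.empty
      = (pvPairs pf).foldl (fun d p => pvUpd1 p.1 p.2 d) PySem.Dict.empty := by
    rw [PySem.List.foldl_congr_mem pf _
      (fun d q => (q.1 :: q.2).foldl (fun d n => update_dict (pvLast n) (pvFirst n) d) d)
      PySem.Dict.empty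
      (by
        intro acc q hq
        simp [pv_lookup_nodup h hq, List.foldl_cons])]
    have h2 : pf.foldl
        (fun d q => (q.1 :: q.2).foldl (fun d n => update_dict (pvLast n) (pvFirst n) d) d)
        PySem.Dict.empty
        = (pvNames pf).foldl (fun d n => update_dict (pvLast n) (pvFirst n) d) PySem.Dict.empty := by
      rw [pvNames, List.foldl_flatMap]
    rw [h2]
    have h3 : (pvPairs pf).foldl (fun d p => update_dict p.1 p.2 d) PySem.Dict.empty
        = (pvNames pf).foldl (fun d n => update_dict (pvLast n) (pvFirst n) d) PySem.Dict.empty := by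
      rw [pvPairs, List.foldl_map]
    rw [← h3]
    exact pv_foldl_upd_eq _ _ PySem.Dict.nodup_keys_empty
  rw [h1]
  have hnd : ((pvPairs pf).foldl (fun d p => pvUpd1 p.1 p.2 d) PySem.Dict.empty).keys.Nodup :=
    pv_nodup_foldl_upd1 _ _ PySem.Dict.nodup_keys_empty
  have hkeys : ((pvPairs pf).foldl (fun d p => pvUpd1 p.1 p.2 d) PySem.Dict.empty).keys
      = (PySem.Set.ofList ((pvPairs pf).map (fun p => p.1)) : List String) := by
    rw [pv_keys_foldl_upd1, PySem.Dict.keys_empty]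
    rfl
  rw [pv_items_foldl_modify _ _ hnd hnd (fun k hk => hk)]
  rw [PySem.Dict.items_eq_map_keys _ hnd [], List.map_map, hkeys]
  apply List.map_congr_left
  intro k hk
  have hg : ((pvPairs pf).foldl (fun d p => pvUpd1 p.1 p.2 d) PySem.Dict.empty).getD k []
      = (PySem.Set.ofList (pvFirsts (pvPairs pf) k) : List String) := by
    rw [pv_getD_foldl_upd1, PySem.Dict.getD_empty, pv_dedup_foldl]
    rfl
  simp [Function.comp, hg, hk]

lemma pv_portB (pf : List (String × List String)) :
    get_last_to_first_alt pf
      = (PySem.Set.ofList ((pvPairs pf).map (fun p => p.1)) : List String).map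
          (fun k => (k, PySem.List.sorted
            ((PySem.Set.ofList (pvFirsts (pvPairs pf) k)) : List String) (fun x => x) false)) := by
  simp only [get_last_to_first_alt]
  have hn : pf.foldl (fun acc q => acc ++ q.1 :: q.2) [] = pvNames pf := by
    rw [PySem.List.foldl_append_eq_flatMap]
    simp [pvNames]
  rw [hn]
  have hp : (pvNames pf).map (fun n => (pvLast n, pvFirst n)) = pvPairs pf := rfl
  rw [hp]
  rw [pv_items_foldl_guard (pvPairs pf)
    (fun k => PySem.List.sorted
      ((PySem.Set.ofList (((pvPairs pf).filter (fun r => r.1 == k)).map (fun r => r.2))) : List String)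
      (fun x => x) false) PySem.Dict.empty]
  have hie : (PySem.Dict.empty : PySem.Dict String (List String)).items = [] := rfl
  rw [hie, PySem.Dict.keys_empty]
  have hpick : pvPick [] ((pvPairs pf).map (fun q => q.1))
      = (PySem.Set.ofList ((pvPairs pf).map (fun p => p.1)) : List String) := by
    have := pv_pick_update ((pvPairs pf).map (fun q => q.1)) []
    simpa using this
  rw [hpick]
  rfl

-- ===== VERDICT (by name: the statement is the Claim_ definition above) =====
theorem get_last_to_first_spec : Claim_equal_get_last_to_first := by
  intro pf _ hpre
  unfold Spec_get_last_to_first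
  rw [pv_portA pf hpre, pv_portB pf]
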